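-- pv_equiv track=rewrite | github.com/lukszi/PolygonDataset | src/polygon_dataset/utils/filename_parser.py | _extract_resolution
-- ===== SOURCE A (Python) =====
-- from typing import Dict, List, Optional, Tuple
--
-- def _extract_resolution(parts: List[str]) -> Tuple[List[str], Optional[str]]:
--     """
--     Extract resolution from filename parts if present.
--
--     Args:
--         parts: List of filename parts split by underscore.
--
--     Returns:
--         Tuple[List[str], Optional[str]]: Tuple containing:
--             - List of remaining parts with the resolution part removed
--             - Resolution value as string, or None if not present
--
--     Raises:
--         ValueError: If resolution part is invalid (not followed by a number).
--     """
--     # Search for a part starting with 'res'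
--     res_index = None
--     for i, part in enumerate(parts):
--         if part.startswith('res'):
--             res_index = i
--             break
--
--     if res_index is None:
--         return parts, None
--
--     # Ensure res is followed by a number
--     if len(parts[res_index]) <= 3 or not parts[res_index][3:].isdigit():
--         raise ValueError(
--             f"Invalid resolution format: {parts[res_index]}. "
--             "Resolution must be followed by a number (e.g., res44)."
--         )
--
--     # Extract resolution value
--     resolution = parts[res_index][3:]  # Remove 'res' prefix
--
--     # Remove resolution part from the list
--     remaining_parts = parts[:res_index] + parts[res_index+1:]
--
--     return remaining_parts, resolution
-- ===== SOURCE B (Python) =====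
-- def _extract_resolution(parts):
--     remaining_parts = []
--     resolution = None
--     found = False
--     for part in parts:
--         if not found and part.startswith('res'):
--             if len(part) <= 3 or not part[3:].isdigit():
--                 raise ValueError(
--                     f"Invalid resolution format: {part}. "
--                     "Resolution must be followed by a number (e.g., res44)."
--                 )
--             resolution = part[3:]
--             found = True
--         else:
--             remaining_parts.append(part)
--     if not found:
--         return parts, None
--     return remaining_parts, resolution
-- ===== Notes on version B (the rewrite author's own statement) =====
-- stated objective: alternative
-- what changed: Replaced find-the-index-then-concatenate-two-slices with a single accumulate pass that builds the remaining list directly and carries a found flag, extracting the resolution in stride.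
import Mathlib
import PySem

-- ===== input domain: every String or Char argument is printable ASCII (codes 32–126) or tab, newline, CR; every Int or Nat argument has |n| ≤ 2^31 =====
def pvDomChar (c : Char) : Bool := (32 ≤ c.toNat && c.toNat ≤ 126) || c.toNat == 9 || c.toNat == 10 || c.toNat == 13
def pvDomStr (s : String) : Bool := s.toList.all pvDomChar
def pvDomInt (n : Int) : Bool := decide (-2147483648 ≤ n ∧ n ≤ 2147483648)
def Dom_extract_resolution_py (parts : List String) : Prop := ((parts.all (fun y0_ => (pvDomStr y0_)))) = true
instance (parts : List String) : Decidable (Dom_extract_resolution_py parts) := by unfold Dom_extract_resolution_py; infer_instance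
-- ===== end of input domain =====

-- B replaces A's find-index-then-two-slices by a single accumulate pass with a found flag (alternative decomposition, same cost).

-- ===== PORT A =====
-- the 'for i, part in enumerate(parts): if part.startswith("res"): res_index = i; break' loop
def pvA_findRes : List (Int × String) → Option Int
  | [] => none
  | (i, part) :: rest =>
    if PySem.Str.startswith part "res" then some i else pvA_findRes rest

def extract_resolution_py (parts : List String) : List String × Option String :=
  match pvA_findRes (PySem.List.enumerate parts 0) with
  | none => (parts, none)
  | some res_index =>
    let part := PySem.List.pyGetD parts res_index ""
    if PySem.Str.len part ≤ 3 || !(PySem.Str.strIsdigit (PySem.Str.slice part (some 3) none))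
    then (parts, none)   -- Python raises ValueError here; excluded by Pre_
    else
      let resolution := PySem.Str.slice part (some 3) none
      (PySem.List.slice parts none (some res_index) ++
         PySem.List.slice parts (some (res_index + 1)) none, some resolution)

-- ===== PORT B =====
-- the single for-loop of Source B over (remaining_parts, resolution, found)
def pvB_loop : List String → List String → Option String → Bool → List String × Option String × Bool
  | [], rem, res, found => (rem, res, found)
  | part :: rest, rem, res, found =>
    if !found && PySem.Str.startswith part "res" then
      if PySem.Str.len part ≤ 3 || !(PySem.Str.strIsdigit (PySem.Str.slice part (some 3) none))
      then (rem, res, found)   -- Python raises ValueError here; excluded by Pre_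
      else pvB_loop rest rem (some (PySem.Str.slice part (some 3) none)) true
    else pvB_loop rest (rem ++ [part]) res found

def extract_resolution_py_alt (parts : List String) : List String × Option String :=
  match pvB_loop parts [] none false with
  | (rem, res, found) => if found then (rem, res) else (parts, none)

-- ===== PRECONDITION & SPEC =====
-- Pre_ excludes exactly the inputs on which A (and B) raise ValueError: the first part
-- starting with 'res' is not 'res' followed by a digit string.
def Pre_extract_resolution_py (parts : List String) : Prop :=
  ∀ p, parts.find? (fun q => PySem.Str.startswith q "res") = some p →
    (3 < PySem.Str.len p ∧ PySem.Str.strIsdigit (PySem.Str.slice p (some 3) none) = true)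
instance (parts : List String) : Decidable (Pre_extract_resolution_py parts) := by
  unfold Pre_extract_resolution_py; infer_instance

def pvWitness_extract_resolution_py : List String := ["a", "res44", "b"]

def Spec_extract_resolution_py (parts : List String) (out : List String × Option String) : Prop := out = extract_resolution_py_alt parts
instance (parts : List String) (out : List String × Option String) : Decidable (Spec_extract_resolution_py parts out) := by unfold Spec_extract_resolution_py; infer_instance

-- ===== CLAIM (what is proved, stated in full; the proofs are below) =====
def Claim_equal_extract_resolution_py : Prop := ∀ (parts : List String), Dom_extract_resolution_py parts → Pre_extract_resolution_py parts → Spec_extract_resolution_py parts (extract_resolution_py parts)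

-- ===== LEMMAS AND PROOFS =====

-- one loop step of B on a non-'res' part
lemma pvB_loop_step_skip (x : String) (t rem : List String) (res : Option String)
    (hx : PySem.Str.startswith x "res" = false) :
    pvB_loop (x :: t) rem res false = pvB_loop t (rem ++ [x]) res false := by
  simp only [pvB_loop, hx]
  simp

-- one loop step of B on a valid 'res' part
lemma pvB_loop_step_hit (x : String) (t rem : List String) (res : Option String)
    (hx : PySem.Str.startswith x "res" = true)
    (hc : (decide (PySem.Str.len x ≤ 3) ||
      !PySem.Str.strIsdigit (PySem.Str.slice x (some 3) none)) = false) :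
    pvB_loop (x :: t) rem res false =
      pvB_loop t rem (some (PySem.Str.slice x (some 3) none)) true := by
  simp only [pvB_loop, hx, hc]
  simp

-- B's loop once the flag is set: it just appends the rest.
lemma pvB_loop_found (l rem : List String) (res : Option String) :
    pvB_loop l rem res true = (rem ++ l, res, true) := by
  induction l generalizing rem with
  | nil => simp [pvB_loop]
  | cons x xs ih => simp [pvB_loop, ih]

-- B's loop over a clean prefix: it appends the prefix and goes on, flag still false.
lemma pvB_loop_clean_append (pre l rem : List String) (res : Option String)
    (h : ∀ q ∈ pre, PySem.Str.startswith q "res" = false) :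
    pvB_loop (pre ++ l) rem res false = pvB_loop l (rem ++ pre) res false := by
  induction pre generalizing rem with
  | nil => simp
  | cons x xs ih =>
    rw [List.cons_append, pvB_loop_step_skip x _ _ _ (h x (by simp)),
      ih _ (fun q hq => h q (by simp [hq]))]
    simp

-- one find-loop step of A on a non-'res' part
lemma pvA_findRes_step (i : Int) (x : String) (rest : List (Int × String))
    (hx : PySem.Str.startswith x "res" = false) :
    pvA_findRes ((i, x) :: rest) = pvA_findRes rest := by
  simp only [pvA_findRes, hx]
  simp

-- A's find loop over an enumerate with no 'res'-part.
lemma pvA_findRes_clean (l : List String) (s : Int)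
    (h : ∀ q ∈ l, PySem.Str.startswith q "res" = false) :
    pvA_findRes (PySem.List.enumerate l s) = none := by
  induction l generalizing s with
  | nil => simp [PySem.List.enumerate_nil, pvA_findRes]
  | cons x xs ih =>
    rw [PySem.List.enumerate_cons, pvA_findRes_step _ _ _ (h x (by simp))]
    exact ih _ (fun q hq => h q (by simp [hq]))

-- A's find loop hits the head of the suffix after a clean prefix.
lemma pvA_findRes_split (pre : List String) (p : String) (post : List String) (s : Int)
    (hpre : ∀ q ∈ pre, PySem.Str.startswith q "res" = false)
    (hp : PySem.Str.startswith p "res" = true) :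
    pvA_findRes (PySem.List.enumerate (pre ++ p :: post) s) = some (s + pre.length) := by
  induction pre generalizing s with
  | nil =>
    rw [List.nil_append, PySem.List.enumerate_cons]
    simp only [pvA_findRes, hp]
    simp
  | cons x xs ih =>
    rw [List.cons_append, PySem.List.enumerate_cons,
      pvA_findRes_step _ _ _ (hpre x (by simp)),
      ih _ (fun q hq => hpre q (by simp [hq]))]
    congr 1
    simp [List.length_cons]
    omega

-- find? = some p on a clean-prefix split gives the head.
lemma find?_split (pre : List String) (p : String) (post : List String)
    (hpre : ∀ q ∈ pre, PySem.Str.startswith q "res" = false)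
    (hp : PySem.Str.startswith p "res" = true) :
    (pre ++ p :: post).find? (fun q => PySem.Str.startswith q "res") = some p := by
  induction pre with
  | nil =>
    rw [List.nil_append]
    exact List.find?_cons_of_pos hp
  | cons x xs ih =>
    have hx : PySem.Chars.startswith x.toList ['r', 'e', 's'] = false := by
      simpa using hpre x (by simp)
    rw [List.cons_append, List.find?_cons_of_neg (by simp [hx]),
      ih (fun q hq => hpre q (by simp [hq]))]

-- a list containing a 'res'-part splits around its FIRST 'res'-part
lemma exists_first_split (l : List String) (q0 : String) (hq0mem : q0 ∈ l)
    (hq0 : PySem.Str.startswith q0 "res" = true) :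
    ∃ pre p post, l = pre ++ p :: post ∧ PySem.Str.startswith p "res" = true ∧
      ∀ q ∈ pre, PySem.Str.startswith q "res" = false := by
  induction l with
  | nil => cases hq0mem
  | cons x xs ih =>
    by_cases hx : PySem.Str.startswith x "res" = true
    · exact ⟨[], x, xs, rfl, hx, by simp⟩
    · have hxf : PySem.Str.startswith x "res" = false := by
        cases h : PySem.Str.startswith x "res" with
        | true => exact absurd h hx
        | false => rfl
      have hxmem : q0 ∈ xs := by
        rcases List.mem_cons.mp hq0mem with rfl | h
        · exact absurd hq0 hx
        · exact h
      obtain ⟨pre, p, post, h1, h2, h3⟩ := ih hxmem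
      refine ⟨x :: pre, p, post, by simp [h1], h2, ?_⟩
      intro q hq
      rcases List.mem_cons.mp hq with rfl | h
      · exact hxf
      · exact h3 q h

theorem extract_resolution_py_spec_aux (parts : List String)
    (hpre : Pre_extract_resolution_py parts) :
    extract_resolution_py parts = extract_resolution_py_alt parts := by
  by_cases hall : ∀ q ∈ parts, PySem.Str.startswith q "res" = false
  · -- no 'res'-part at all: both return (parts, none)
    unfold extract_resolution_py extract_resolution_py_alt
    rw [pvA_findRes_clean parts 0 hall]
    rw [show parts = parts ++ [] from by simp, pvB_loop_clean_append parts [] [] none hall]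
    simp [pvB_loop]
  · -- there is a first 'res'-part: split parts around it
    push_neg at hall
    obtain ⟨q0, hq0mem, hq0⟩ := hall
    have hq0' : PySem.Str.startswith q0 "res" = true := by
      cases h : PySem.Str.startswith q0 "res" with
      | true => rfl
      | false => exact absurd h hq0
    obtain ⟨pre, p, post, hsplit, hpzero, hppre⟩ := exists_first_split parts q0 hq0mem hq0'
    subst hsplit
    have hvalid := hpre p (find?_split pre p post hppre hpzero)
    have hA := pvA_findRes_split pre p post 0 hppre hpzero
    rw [zero_add] at hA
    have hget : PySem.List.pyGetD (pre ++ p :: post) (pre.length : Int) "" = p := by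
      rw [PySem.List.pyGetD_natCast]
      simp
    have hcond : (decide (PySem.Str.len p ≤ 3) ||
        !PySem.Str.strIsdigit (PySem.Str.slice p (some 3) none)) = false := by
      have hlen : 3 < PySem.Str.len p := hvalid.1
      rw [hvalid.2]
      simp only [Bool.not_true, Bool.or_false, decide_eq_false_iff_not]
      omega
    have hB : pvB_loop (pre ++ p :: post) [] none false =
        (pre ++ post, some (PySem.Str.slice p (some 3) none), true) := by
      rw [pvB_loop_clean_append pre (p :: post) [] none hppre, List.nil_append,
        pvB_loop_step_hit p post pre none hpzero hcond, pvB_loop_found]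
    unfold extract_resolution_py extract_resolution_py_alt
    rw [hA]
    dsimp only
    rw [hget, hcond, hB]
    simp only [Bool.false_eq_true, if_false, if_true]
    rw [PySem.List.slice_to_natCast]
    have h1 : ((pre.length : Int) + 1) = ((pre.length + 1 : Nat) : Int) := by push_cast; ring
    rw [h1, PySem.List.slice_from_natCast]
    simp

-- ===== VERDICT (by name: the statement is the Claim_ definition above) =====
theorem extract_resolution_py_spec : Claim_equal_extract_resolution_py := by
  intro parts _ hpre
  unfold Spec_extract_resolution_py
  exact extract_resolution_py_spec_aux parts hpre
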